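-- pv_equiv track=rewrite | github.com/fentender/sutan-game | src/core/diff_formatter.py | build_padded_texts
-- ===== SOURCE A (Python) =====
-- def build_padded_texts(
--     left_lines: list[str],
--     right_lines: list[str],
--     opcodes: list[tuple[str, int, int, int, int]],
-- ) -> tuple[
--     list[str], list[str],
--     list[int | None], list[int | None],
--     dict[int, int], dict[int, int],
-- ]:
--     """根据 opcodes 在行数少的一侧插入空行，使两侧总行数一致。
--
--     返回:
--         padded_left, padded_right: 填充后的行列表
--         left_map, right_map: padded_index → 原始行号(0-based)|None
--         left_o2p, right_o2p: 原始行号 → padded_index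
--     """
--     padded_left: list[str] = []
--     padded_right: list[str] = []
--     left_map: list[int | None] = []
--     right_map: list[int | None] = []
--     left_o2p: dict[int, int] = {}
--     right_o2p: dict[int, int] = {}
--
--     for tag, i1, i2, j1, j2 in opcodes:
--         left_count = i2 - i1
--         right_count = j2 - j1
--
--         if tag == "equal":
--             for k in range(left_count):
--                 idx = len(padded_left)
--                 left_o2p[i1 + k] = idx
--                 right_o2p[j1 + k] = idx
--                 padded_left.append(left_lines[i1 + k])
--                 padded_right.append(right_lines[j1 + k])
--                 left_map.append(i1 + k)
--                 right_map.append(j1 + k)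
--
--         elif tag == "insert":
--             for k in range(right_count):
--                 idx = len(padded_left)
--                 right_o2p[j1 + k] = idx
--                 padded_left.append("")
--                 padded_right.append(right_lines[j1 + k])
--                 left_map.append(None)
--                 right_map.append(j1 + k)
--
--         elif tag == "delete":
--             for k in range(left_count):
--                 idx = len(padded_left)
--                 left_o2p[i1 + k] = idx
--                 padded_left.append(left_lines[i1 + k])
--                 padded_right.append("")
--                 left_map.append(i1 + k)
--                 right_map.append(None)
--
--         elif tag == "replace":
--             max_count = max(left_count, right_count)
--             for k in range(max_count):
--                 idx = len(padded_left)
--                 if k < left_count: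
--                     left_o2p[i1 + k] = idx
--                     padded_left.append(left_lines[i1 + k])
--                     left_map.append(i1 + k)
--                 else:
--                     padded_left.append("")
--                     left_map.append(None)
--                 if k < right_count:
--                     right_o2p[j1 + k] = idx
--                     padded_right.append(right_lines[j1 + k])
--                     right_map.append(j1 + k)
--                 else:
--                     padded_right.append("")
--                     right_map.append(None)
--
--     assert len(padded_left) == len(padded_right)
--     return padded_left, padded_right, left_map, right_map, left_o2p, right_o2p
-- ===== SOURCE B (Python) =====
-- def build_padded_texts(
--     left_lines: list[str],
--     right_lines: list[str],
--     opcodes: list[tuple[str, int, int, int, int]],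
-- ) -> tuple[
--     list[str], list[str],
--     list[int | None], list[int | None],
--     dict[int, int], dict[int, int],
-- ]:
--     # Pass 1: compute the alignment as a list of (left_orig|None, right_orig|None).
--     align = []
--     for tag, i1, i2, j1, j2 in opcodes:
--         if tag == "equal":
--             align.extend((i1 + k, j1 + k) for k in range(i2 - i1))
--         elif tag == "insert":
--             align.extend((None, j1 + k) for k in range(j2 - j1))
--         elif tag == "delete":
--             align.extend((i1 + k, None) for k in range(i2 - i1))
--         elif tag == "replace":
--             lc, rc = i2 - i1, j2 - j1
--             align.extend(
--                 (i1 + k if k < lc else None, j1 + k if k < rc else None)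
--                 for k in range(max(lc, rc))
--             )
--     # Pass 2: materialize all six outputs from the alignment.
--     padded_left = [left_lines[l] if l is not None else "" for l, _ in align]
--     padded_right = [right_lines[r] if r is not None else "" for _, r in align]
--     left_map = [l for l, _ in align]
--     right_map = [r for _, r in align]
--     left_o2p = {l: idx for idx, (l, _) in enumerate(align) if l is not None}
--     right_o2p = {r: idx for idx, (_, r) in enumerate(align) if r is not None}
--     assert len(padded_left) == len(padded_right)
--     return padded_left, padded_right, left_map, right_map, left_o2p, right_o2p
-- ===== Notes on version B (the rewrite author's own statement) =====
-- stated objective: alternative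
-- what changed: A interleaves six accumulators inside one pass over opcodes with per-tag inner loops; B first builds a single alignment list of (left_index|None, right_index|None) pairs and then materializes all six outputs from it with comprehensions and an enumerate-based dict build.
import Mathlib
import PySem

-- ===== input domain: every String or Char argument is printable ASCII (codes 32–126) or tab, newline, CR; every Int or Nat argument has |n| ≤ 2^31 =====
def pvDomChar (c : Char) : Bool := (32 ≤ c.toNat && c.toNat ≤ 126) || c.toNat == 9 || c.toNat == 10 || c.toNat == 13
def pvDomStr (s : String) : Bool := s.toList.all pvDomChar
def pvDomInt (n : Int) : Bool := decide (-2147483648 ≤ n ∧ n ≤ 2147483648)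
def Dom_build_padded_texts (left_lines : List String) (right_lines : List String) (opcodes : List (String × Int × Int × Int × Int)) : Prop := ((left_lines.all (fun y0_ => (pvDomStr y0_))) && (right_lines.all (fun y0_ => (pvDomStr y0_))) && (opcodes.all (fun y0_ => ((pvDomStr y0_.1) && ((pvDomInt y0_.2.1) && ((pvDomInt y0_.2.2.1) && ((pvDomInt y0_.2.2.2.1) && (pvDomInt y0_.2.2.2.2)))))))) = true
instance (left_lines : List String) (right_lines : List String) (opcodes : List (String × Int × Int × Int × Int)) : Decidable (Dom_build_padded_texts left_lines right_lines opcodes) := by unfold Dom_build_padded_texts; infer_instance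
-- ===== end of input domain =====

-- B replaces A's single interleaved six-accumulator loop by a two-pass decomposition:
-- first build one alignment list of (left_orig?, right_orig?) pairs from the opcodes,
-- then materialize the six outputs from it (objective: alternative decomposition, same cost).


-- ===== PORT A =====
-- A-side helper: the body of A's 'for tag, i1, i2, j1, j2 in opcodes' loop, acting on the
-- six-accumulator state (padded_left, padded_right, left_map, right_map, left_o2p, right_o2p).
def pvAstep (left_lines : List String) (right_lines : List String)
    (st : List String × List String × List (Option Int) × List (Option Int) × PySem.Dict Int Int × PySem.Dict Int Int)
    (op : String × Int × Int × Int × Int) :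
    List String × List String × List (Option Int) × List (Option Int) × PySem.Dict Int Int × PySem.Dict Int Int :=
  let tag := op.1
  let i1 := op.2.1
  let i2 := op.2.2.1
  let j1 := op.2.2.2.1
  let j2 := op.2.2.2.2
  let left_count := i2 - i1
  let right_count := j2 - j1
  if tag = "equal" then
    (PySem.List.pyRange 0 left_count 1).foldl (fun st k =>
      let idx : Int := st.1.length
      (st.1 ++ [PySem.List.pyGetD left_lines (i1 + k) ""],
       st.2.1 ++ [PySem.List.pyGetD right_lines (j1 + k) ""],
       st.2.2.1 ++ [some (i1 + k)],
       st.2.2.2.1 ++ [some (j1 + k)],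
       st.2.2.2.2.1.insert (i1 + k) idx,
       st.2.2.2.2.2.insert (j1 + k) idx)) st
  else if tag = "insert" then
    (PySem.List.pyRange 0 right_count 1).foldl (fun st k =>
      let idx : Int := st.1.length
      (st.1 ++ [""],
       st.2.1 ++ [PySem.List.pyGetD right_lines (j1 + k) ""],
       st.2.2.1 ++ [(none : Option Int)],
       st.2.2.2.1 ++ [some (j1 + k)],
       st.2.2.2.2.1,
       st.2.2.2.2.2.insert (j1 + k) idx)) st
  else if tag = "delete" then
    (PySem.List.pyRange 0 left_count 1).foldl (fun st k =>
      let idx : Int := st.1.length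
      (st.1 ++ [PySem.List.pyGetD left_lines (i1 + k) ""],
       st.2.1 ++ [""],
       st.2.2.1 ++ [some (i1 + k)],
       st.2.2.2.1 ++ [(none : Option Int)],
       st.2.2.2.2.1.insert (i1 + k) idx,
       st.2.2.2.2.2)) st
  else if tag = "replace" then
    -- max_count = max(left_count, right_count), inlined
    (PySem.List.pyRange 0 (max left_count right_count) 1).foldl (fun st k =>
      let idx : Int := st.1.length
      -- the left half of Python's body (its first if/else), then the right half
      let lhalf :=
        if k < left_count then
          (st.1 ++ [PySem.List.pyGetD left_lines (i1 + k) ""], st.2.2.1 ++ [some (i1 + k)],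
           st.2.2.2.2.1.insert (i1 + k) idx)
        else
          (st.1 ++ [""], st.2.2.1 ++ [(none : Option Int)], st.2.2.2.2.1)
      let rhalf :=
        if k < right_count then
          (st.2.1 ++ [PySem.List.pyGetD right_lines (j1 + k) ""], st.2.2.2.1 ++ [some (j1 + k)],
           st.2.2.2.2.2.insert (j1 + k) idx)
        else
          (st.2.1 ++ [""], st.2.2.2.1 ++ [(none : Option Int)], st.2.2.2.2.2)
      (lhalf.1, rhalf.1, lhalf.2.1, rhalf.2.1, lhalf.2.2, rhalf.2.2)) st
  else
    st

-- Port of A. The final 'assert len(padded_left) == len(padded_right)' always holds (both sides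
-- grow in lock-step), so nothing is ported for it. Dicts are returned as their items lists.
def build_padded_texts (left_lines : List String) (right_lines : List String) (opcodes : List (String × Int × Int × Int × Int)) : List String × List String × List (Option Int) × List (Option Int) × (List (Int × Int)) × (List (Int × Int)) :=
  let st := opcodes.foldl (pvAstep left_lines right_lines)
    ([], [], [], [], PySem.Dict.empty, PySem.Dict.empty)
  (st.1, st.2.1, st.2.2.1, st.2.2.2.1, st.2.2.2.2.1.items, st.2.2.2.2.2.items)

-- ===== PORT B =====
-- B-side helper: the alignment pairs one opcode contributes (pass 1's per-opcode work).
def pvAlignOp (op : String × Int × Int × Int × Int) : List (Option Int × Option Int) :=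
  let tag := op.1
  let i1 := op.2.1
  let i2 := op.2.2.1
  let j1 := op.2.2.2.1
  let j2 := op.2.2.2.2
  if tag = "equal" then
    (PySem.List.pyRange 0 (i2 - i1) 1).map (fun k => (some (i1 + k), some (j1 + k)))
  else if tag = "insert" then
    (PySem.List.pyRange 0 (j2 - j1) 1).map (fun k => ((none : Option Int), some (j1 + k)))
  else if tag = "delete" then
    (PySem.List.pyRange 0 (i2 - i1) 1).map (fun k => (some (i1 + k), (none : Option Int)))
  else if tag = "replace" then
    (PySem.List.pyRange 0 (max (i2 - i1) (j2 - j1)) 1).map (fun k =>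
      ((if k < i2 - i1 then some (i1 + k) else none), (if k < j2 - j1 then some (j1 + k) else none)))
  else []

-- Port of B: build the alignment list, then materialize the six outputs from it.
def build_padded_texts_alt (left_lines : List String) (right_lines : List String) (opcodes : List (String × Int × Int × Int × Int)) : List String × List String × List (Option Int) × List (Option Int) × (List (Int × Int)) × (List (Int × Int)) :=
  let align := opcodes.foldl (fun acc op => acc ++ pvAlignOp op) []
  let padded_left := align.map (fun p => match p.1 with | some i => PySem.List.pyGetD left_lines i "" | none => "")
  let padded_right := align.map (fun p => match p.2 with | some j => PySem.List.pyGetD right_lines j "" | none => "")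
  let left_map := align.map Prod.fst
  let right_map := align.map Prod.snd
  let left_o2p := (PySem.List.enumerate align 0).foldl
    (fun d q => match q.2.1 with | some i => d.insert i q.1 | none => d) (PySem.Dict.empty : PySem.Dict Int Int)
  let right_o2p := (PySem.List.enumerate align 0).foldl
    (fun d q => match q.2.2 with | some j => d.insert j q.1 | none => d) (PySem.Dict.empty : PySem.Dict Int Int)
  (padded_left, padded_right, left_map, right_map, left_o2p.items, right_o2p.items)

-- ===== PRECONDITION & SPEC =====
-- Pre_ excludes exactly the inputs on which A raises IndexError: an opcode whose iterated
-- left/right indices fall outside Python's valid (possibly negative) index range.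
def Pre_build_padded_texts (left_lines : List String) (right_lines : List String) (opcodes : List (String × Int × Int × Int × Int)) : Prop :=
  ∀ op ∈ opcodes,
    (op.1 = "equal" → ∀ k ∈ PySem.List.pyRange 0 (op.2.2.1 - op.2.1) 1,
        PySem.Raise.InRange left_lines.length (op.2.1 + k) ∧ PySem.Raise.InRange right_lines.length (op.2.2.2.1 + k)) ∧
    (op.1 = "insert" → ∀ k ∈ PySem.List.pyRange 0 (op.2.2.2.2 - op.2.2.2.1) 1,
        PySem.Raise.InRange right_lines.length (op.2.2.2.1 + k)) ∧
    (op.1 = "delete" → ∀ k ∈ PySem.List.pyRange 0 (op.2.2.1 - op.2.1) 1,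
        PySem.Raise.InRange left_lines.length (op.2.1 + k)) ∧
    (op.1 = "replace" →
        (∀ k ∈ PySem.List.pyRange 0 (op.2.2.1 - op.2.1) 1, PySem.Raise.InRange left_lines.length (op.2.1 + k)) ∧
        (∀ k ∈ PySem.List.pyRange 0 (op.2.2.2.2 - op.2.2.2.1) 1, PySem.Raise.InRange right_lines.length (op.2.2.2.1 + k)))
instance (left_lines : List String) (right_lines : List String) (opcodes : List (String × Int × Int × Int × Int)) : Decidable (Pre_build_padded_texts left_lines right_lines opcodes) := by unfold Pre_build_padded_texts; infer_instance

def pvWitness_build_padded_texts : List String × List String × (List (String × Int × Int × Int × Int)) :=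
  (["a", "b"], ["a", "c"], [("equal", 0, 1, 0, 1), ("replace", 1, 2, 1, 2)])

def Spec_build_padded_texts (left_lines : List String) (right_lines : List String) (opcodes : List (String × Int × Int × Int × Int)) (out : List String × List String × List (Option Int) × List (Option Int) × (List (Int × Int)) × (List (Int × Int))) : Prop := out = build_padded_texts_alt left_lines right_lines opcodes
instance (left_lines : List String) (right_lines : List String) (opcodes : List (String × Int × Int × Int × Int)) (out : List String × List String × List (Option Int) × List (Option Int) × (List (Int × Int)) × (List (Int × Int))) : Decidable (Spec_build_padded_texts left_lines right_lines opcodes out) := by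
  unfold Spec_build_padded_texts
  have h6 : DecidableEq (List (Int × Int)) := inferInstance
  have h5 : DecidableEq (List (Int × Int) × List (Int × Int)) := @instDecidableEqProd _ _ h6 h6
  have h4 : DecidableEq (List (Option Int) × List (Int × Int) × List (Int × Int)) := @instDecidableEqProd _ _ inferInstance h5
  have h3 : DecidableEq (List (Option Int) × List (Option Int) × List (Int × Int) × List (Int × Int)) := @instDecidableEqProd _ _ inferInstance h4
  have h2 : DecidableEq (List String × List (Option Int) × List (Option Int) × List (Int × Int) × List (Int × Int)) := @instDecidableEqProd _ _ inferInstance h3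
  have h1 : DecidableEq (List String × List String × List (Option Int) × List (Option Int) × List (Int × Int) × List (Int × Int)) := @instDecidableEqProd _ _ inferInstance h2
  exact h1 _ _

-- ===== CLAIM (what is proved, stated in full; the proofs are below) =====
def Claim_equal_build_padded_texts : Prop := ∀ (left_lines : List String) (right_lines : List String) (opcodes : List (String × Int × Int × Int × Int)), Dom_build_padded_texts left_lines right_lines opcodes → Pre_build_padded_texts left_lines right_lines opcodes → Spec_build_padded_texts left_lines right_lines opcodes (build_padded_texts left_lines right_lines opcodes)

-- ===== LEMMAS AND PROOFS =====

-- The per-pair step both ports' traversals factor through: consume one alignment pair.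
def pvGenStep (left_lines : List String) (right_lines : List String)
    (st : List String × List String × List (Option Int) × List (Option Int) × PySem.Dict Int Int × PySem.Dict Int Int)
    (p : Option Int × Option Int) :
    List String × List String × List (Option Int) × List (Option Int) × PySem.Dict Int Int × PySem.Dict Int Int :=
  let idx : Int := st.1.length
  (st.1 ++ [match p.1 with | some i => PySem.List.pyGetD left_lines i "" | none => ""],
   st.2.1 ++ [match p.2 with | some j => PySem.List.pyGetD right_lines j "" | none => ""],
   st.2.2.1 ++ [p.1],
   st.2.2.2.1 ++ [p.2],
   match p.1 with | some i => st.2.2.2.2.1.insert i idx | none => st.2.2.2.2.1,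
   match p.2 with | some j => st.2.2.2.2.2.insert j idx | none => st.2.2.2.2.2)

-- A's per-opcode loop is the pvGenStep-fold over that opcode's alignment pairs.
theorem pvAstep_eq_foldGen (left_lines right_lines : List String)
    (op : String × Int × Int × Int × Int)
    (st : List String × List String × List (Option Int) × List (Option Int) × PySem.Dict Int Int × PySem.Dict Int Int) :
    pvAstep left_lines right_lines st op = (pvAlignOp op).foldl (pvGenStep left_lines right_lines) st := by
  unfold pvAstep pvAlignOp
  by_cases h1 : op.1 = "equal"
  · rw [if_pos h1, if_pos h1, List.foldl_map]; rfl
  · rw [if_neg h1, if_neg h1]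
    by_cases h2 : op.1 = "insert"
    · rw [if_pos h2, if_pos h2, List.foldl_map]; rfl
    · rw [if_neg h2, if_neg h2]
      by_cases h3 : op.1 = "delete"
      · rw [if_pos h3, if_pos h3, List.foldl_map]; rfl
      · rw [if_neg h3, if_neg h3]
        by_cases h4 : op.1 = "replace"
        · rw [if_pos h4, if_pos h4, List.foldl_map]
          congr 1
          funext st k
          by_cases hl : k < op.2.2.1 - op.2.1 <;> by_cases hr : k < op.2.2.2.2 - op.2.2.2.1 <;>
            simp only [hl, hr, if_false, if_pos, pvGenStep]
        · rw [if_neg h4, if_neg h4, List.foldl_nil]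

-- Folding pvGenStep over a pair list materializes it onto the state (B's pass 2),
-- with dict insertions enumerated from the current padded length.
theorem pvFoldGen (left_lines right_lines : List String)
    (ps : List (Option Int × Option Int))
    (pl pr : List String) (lm rm : List (Option Int)) (lo ro : PySem.Dict Int Int) :
    ps.foldl (pvGenStep left_lines right_lines) (pl, pr, lm, rm, lo, ro) =
    (pl ++ ps.map (fun p => match p.1 with | some i => PySem.List.pyGetD left_lines i "" | none => ""),
     pr ++ ps.map (fun p => match p.2 with | some j => PySem.List.pyGetD right_lines j "" | none => ""),
     lm ++ ps.map Prod.fst,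
     rm ++ ps.map Prod.snd,
     (PySem.List.enumerate ps (pl.length : Int)).foldl
       (fun d q => match q.2.1 with | some i => d.insert i q.1 | none => d) lo,
     (PySem.List.enumerate ps (pl.length : Int)).foldl
       (fun d q => match q.2.2 with | some j => d.insert j q.1 | none => d) ro) := by
  induction ps generalizing pl pr lm rm lo ro with
  | nil => simp [PySem.List.enumerate_nil]
  | cons p ps ih =>
    rw [List.foldl_cons,
      show pvGenStep left_lines right_lines (pl, pr, lm, rm, lo, ro) p =
        (pl ++ [match p.1 with | some i => PySem.List.pyGetD left_lines i "" | none => ""],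
         pr ++ [match p.2 with | some j => PySem.List.pyGetD right_lines j "" | none => ""],
         lm ++ [p.1], rm ++ [p.2],
         match p.1 with | some i => lo.insert i ((pl.length : Int)) | none => lo,
         match p.2 with | some j => ro.insert j ((pl.length : Int)) | none => ro) from rfl,
      ih, PySem.List.enumerate_cons]
    simp only [List.map_cons, List.foldl_cons, List.append_assoc, List.singleton_append,
      List.length_append, List.length_cons, List.length_nil, Nat.cast_add, Nat.cast_one,
      zero_add]

-- A's whole loop is the pvGenStep-fold over the concatenated alignment.
theorem pvAfold_eq (left_lines right_lines : List String)
    (ops : List (String × Int × Int × Int × Int))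
    (st : List String × List String × List (Option Int) × List (Option Int) × PySem.Dict Int Int × PySem.Dict Int Int) :
    ops.foldl (pvAstep left_lines right_lines) st =
    (ops.flatMap pvAlignOp).foldl (pvGenStep left_lines right_lines) st := by
  induction ops generalizing st with
  | nil => rfl
  | cons op ops ih =>
    rw [List.foldl_cons, ih, pvAstep_eq_foldGen, List.flatMap_cons, List.foldl_append]

-- ===== VERDICT (by name: the statement is the Claim_ definition above) =====
theorem build_padded_texts_spec : Claim_equal_build_padded_texts := by
  intro left_lines right_lines opcodes _ _
  unfold Spec_build_padded_texts build_padded_texts build_padded_texts_alt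
  rw [PySem.List.foldl_append_eq_flatMap, pvAfold_eq, pvFoldGen]
  simp
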